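-- pv_equiv track=rewrite | github.com/a921198345/studypartner007 | merge_exam_documents.py | analyze_missing_content
-- ===== SOURCE A (Python) =====
-- def analyze_missing_content(scanned_questions, docx_questions):
--     """分析完整版文档中缺失的题目题干"""
--     missing_stems = {}
--
--     for q_num in docx_questions:
--         docx_content = docx_questions[q_num]
--         scanned_content = scanned_questions.get(q_num, "")
--
--         # 检查是否缺少题干（通常题干会包含问号）
--         if '?' not in docx_content and scanned_content and '?' in scanned_content:
--             # 提取扫描版中的题干
--             lines = scanned_content.split('\n')
--             stem_lines = []
--             for line in lines:
--                 stem_lines.append(line)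
--                 if '?' in line:
--                     break
--
--             missing_stems[q_num] = '\n'.join(stem_lines)
--
--     return missing_stems
-- ===== SOURCE B (Python) =====
-- def _stem(sc):
--     # single character pass: copy chars until the first '\n' that follows a '?'
--     out = []
--     seen = False
--     for ch in sc:
--         if seen and ch == '\n':
--             break
--         out.append(ch)
--         seen = seen or ch == '?'
--     return ''.join(out)
--
--
-- def analyze_missing_content(scanned_questions, docx_questions):
--     return {
--         q: _stem(sc)
--         for q, dc in docx_questions.items()
--         if '?' not in dc and '?' in (sc := scanned_questions.get(q, ''))
--     }
-- ===== Notes on version B (the rewrite author's own statement) =====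
-- stated objective: simpler
-- what changed: Replaces A's explicit loop-and-dict build with a dict comprehension, drops the redundant non-empty check (implied by "'?' in sc"), and extracts the stem in a single character pass with a seen-'?' flag instead of splitting into a line list, looping with break and re-joining.
import Mathlib
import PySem

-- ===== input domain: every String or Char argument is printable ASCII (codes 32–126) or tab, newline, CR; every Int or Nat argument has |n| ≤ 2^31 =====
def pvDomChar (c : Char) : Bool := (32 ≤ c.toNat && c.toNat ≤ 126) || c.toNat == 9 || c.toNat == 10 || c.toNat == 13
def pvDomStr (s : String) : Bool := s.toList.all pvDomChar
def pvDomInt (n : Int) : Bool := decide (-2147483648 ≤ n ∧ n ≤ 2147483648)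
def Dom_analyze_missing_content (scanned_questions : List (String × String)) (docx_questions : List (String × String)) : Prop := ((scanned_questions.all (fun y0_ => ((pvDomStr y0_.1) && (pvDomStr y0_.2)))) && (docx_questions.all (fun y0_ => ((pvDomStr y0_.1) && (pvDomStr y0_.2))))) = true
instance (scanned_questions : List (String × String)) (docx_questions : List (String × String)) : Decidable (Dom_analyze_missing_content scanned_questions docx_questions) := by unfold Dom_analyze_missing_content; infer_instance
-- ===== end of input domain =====

-- B extracts the stem in one character pass (seen-'?' flag) via a dict comprehension, instead of
-- A's split-into-lines / accumulate-until-'?' / re-join loop; same results, similar cost (objective: simpler).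

-- ===== PORT A =====
-- 'stem_lines' loop: append each line, break after the first line containing '?'
def pyStemLines : List String → List String
  | [] => []
  | l :: ls => l :: (if PySem.Str.isIn "?" l then [] else pyStemLines ls)

def analyze_missing_content (scanned_questions : List (String × String)) (docx_questions : List (String × String)) : List (String × String) :=
  docx_questions.foldl (fun missing_stems p =>
    let docx_content := p.2
    let scanned_content := (List.lookup p.1 scanned_questions).getD ""
    if !PySem.Str.isIn "?" docx_content && !(scanned_content == "") && PySem.Str.isIn "?" scanned_content then
      missing_stems ++ [(p.1, PySem.Str.join "\n" (pyStemLines ((PySem.Str.split? scanned_content "\n").getD [])))]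
    else missing_stems) []

-- ===== PORT B =====
-- '_stem': copy characters until the first '\n' that follows a '?'
def stemScan : List Char → Bool → List Char
  | [], _ => []
  | c :: cs, seen => if seen && c == '\n' then [] else c :: stemScan cs (seen || c == '?')

def analyze_missing_content_alt (scanned_questions : List (String × String)) (docx_questions : List (String × String)) : List (String × String) :=
  docx_questions.filterMap (fun p =>
    let sc := (List.lookup p.1 scanned_questions).getD ""
    if !PySem.Str.isIn "?" p.2 && PySem.Str.isIn "?" sc then
      some (p.1, String.ofList (stemScan sc.toList false))
    else none)

-- ===== PRECONDITION & SPEC =====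
def Spec_analyze_missing_content (scanned_questions : List (String × String)) (docx_questions : List (String × String)) (out : List (String × String)) : Prop := out = analyze_missing_content_alt scanned_questions docx_questions
instance (scanned_questions : List (String × String)) (docx_questions : List (String × String)) (out : List (String × String)) : Decidable (Spec_analyze_missing_content scanned_questions docx_questions out) := by unfold Spec_analyze_missing_content; infer_instance

-- ===== CLAIM (what is proved, stated in full; the proofs are below) =====
def Claim_equal_analyze_missing_content : Prop := ∀ (scanned_questions : List (String × String)) (docx_questions : List (String × String)), Dom_analyze_missing_content scanned_questions docx_questions → Spec_analyze_missing_content scanned_questions docx_questions (analyze_missing_content scanned_questions docx_questions)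

-- ===== LEMMAS AND PROOFS =====

-- structural model of scanned_content.split('\n')
def splitNL : List Char → List (List Char)
  | [] => [[]]
  | c :: t =>
    match splitNL t with
    | [] => []
    | h :: r => if c = '\n' then [] :: h :: r else (c :: h) :: r

theorem splitNL_ne_nil (cs : List Char) : splitNL cs ≠ [] := by
  induction cs with
  | nil => simp [splitNL]
  | cons c t ih =>
    cases e : splitNL t with
    | nil => exact absurd e ih
    | cons h r => simp only [splitNL, e]; split <;> simp

theorem go_nl (l : List Char) : ∀ (fuel : Nat) (cur : List Char) (acc : List (List Char)),
    l.length < fuel →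
    PySem.Chars.splitOn.go ['\n'] fuel l cur acc
      = acc.reverse ++ List.modifyHead (cur.reverse ++ ·) (splitNL l) := by
  induction l with
  | nil =>
    intro fuel cur acc h
    cases fuel with
    | zero => omega
    | succ f => simp [PySem.Chars.splitOn.go, splitNL]
  | cons c t ih =>
    intro fuel cur acc h
    cases fuel with
    | zero => omega
    | succ f =>
      obtain ⟨hd, r, e⟩ : ∃ hd r, splitNL t = hd :: r := by
        cases e : splitNL t with
        | nil => exact absurd e (splitNL_ne_nil t)
        | cons hd r => exact ⟨hd, r, rfl⟩
      by_cases hc : c = '\n'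
      · simp only [PySem.Chars.splitOn.go, List.isPrefixOf, hc, beq_self_eq_true,
          Bool.true_and, if_true]
        rw [show List.drop ['\n'].length ('\n' :: t) = t from rfl]
        rw [ih f [] (cur.reverse :: acc) (by simp at h; omega)]
        simp [splitNL, e]
      · simp only [PySem.Chars.splitOn.go, List.isPrefixOf]
        have hbe : ('\n' == c) = false := beq_eq_false_iff_ne.mpr (fun h => hc h.symm)
        simp only [hbe, Bool.false_and]
        rw [ih f (c :: cur) acc (by simp at h; omega)]
        simp [splitNL, e, hc]

theorem splitOn_nl (cs : List Char) : PySem.Chars.splitOn cs ['\n'] = splitNL cs := by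
  have h := go_nl cs (cs.length + 1) [] [] (by omega)
  obtain ⟨hd, r, e⟩ : ∃ hd r, splitNL cs = hd :: r := by
    cases e : splitNL cs with
    | nil => exact absurd e (splitNL_ne_nil cs)
    | cons hd r => exact ⟨hd, r, rfl⟩
  simpa [PySem.Chars.splitOn, e] using h

theorem stemScan_true (cs : List Char) : stemScan cs true = cs.takeWhile (· ≠ '\n') := by
  induction cs with
  | nil => simp [stemScan]
  | cons c t ih =>
    by_cases hc : c = '\n' <;> simp [stemScan, hc, ih]

theorem splitNL_head (cs : List Char) : (splitNL cs).headI = cs.takeWhile (· ≠ '\n') := by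
  induction cs with
  | nil => simp [splitNL]
  | cons c t ih =>
    obtain ⟨hd, r, e⟩ : ∃ hd r, splitNL t = hd :: r := by
      cases e : splitNL t with
      | nil => exact absurd e (splitNL_ne_nil t)
      | cons hd r => exact ⟨hd, r, rfl⟩
    by_cases hc : c = '\n' <;>
      simp_all [splitNL]

-- char-level shadow of A's stem_lines loop
def stemLinesC : List (List Char) → List (List Char)
  | [] => []
  | l :: ls => l :: (if PySem.Chars.isIn ['?'] l then [] else stemLinesC ls)

theorem isIn_q (l : List Char) : PySem.Chars.isIn ['?'] l = l.contains '?' := by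
  by_cases h : '?' ∈ l
  · rw [show PySem.Chars.isIn ['?'] l = true from (PySem.Chars.isIn_iff_infix _ _).mpr ((List.singleton_infix_iff _ _).mpr h)]
    simp [h]
  · rw [show PySem.Chars.isIn ['?'] l = false from
      (PySem.Chars.isIn_eq_false_iff _ _).mpr (fun hin => h ((List.singleton_infix_iff _ _).mp hin))]
    simp [h]

theorem join_cons_head (c : Char) (h : List Char) (X : List (List Char)) :
    PySem.Chars.join ['\n'] ((c :: h) :: X) = c :: PySem.Chars.join ['\n'] (h :: X) := by
  cases X with
  | nil => simp [PySem.Chars.join_singleton]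
  | cons q rest => simp [PySem.Chars.join_cons_cons]

theorem stem_chars (cs : List Char) :
    PySem.Chars.join ['\n'] (stemLinesC (splitNL cs)) = stemScan cs false := by
  induction cs with
  | nil =>
    rw [show splitNL [] = [[]] from rfl, show stemLinesC [[]] = [[]] from rfl,
      PySem.Chars.join_singleton]
    rfl
  | cons c t ih =>
    obtain ⟨hd, r, e⟩ : ∃ hd r, splitNL t = hd :: r := by
      cases e : splitNL t with
      | nil => exact absurd e (splitNL_ne_nil t)
      | cons hd r => exact ⟨hd, r, rfl⟩
    rw [e] at ih
    by_cases hc : c = '\n'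
    · subst hc
      rw [show splitNL ('\n' :: t) = [] :: hd :: r by simp [splitNL, e]]
      rw [show stemLinesC ([] :: hd :: r) = [] :: stemLinesC (hd :: r) from rfl]
      obtain ⟨x, xs, ex⟩ : ∃ x xs, stemLinesC (hd :: r) = x :: xs := ⟨hd, _, rfl⟩
      rw [ex, PySem.Chars.join_cons_cons, ← ex, ih]
      rw [show stemScan ('\n' :: t) false = '\n' :: stemScan t false by simp [stemScan]]
      simp
    · by_cases hq : c = '?'
      · subst hq
        rw [show splitNL ('?' :: t) = ('?' :: hd) :: r by simp [splitNL, e, hc]]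
        rw [show stemLinesC (('?' :: hd) :: r) = [('?' :: hd)] by
          simp [stemLinesC, isIn_q]]
        rw [PySem.Chars.join_singleton]
        have hhd : hd = t.takeWhile (· ≠ '\n') := by
          have h1 := splitNL_head t; rw [e] at h1; simpa using h1
        rw [show stemScan ('?' :: t) false = '?' :: stemScan t true by simp [stemScan]]
        rw [stemScan_true, hhd]
      · rw [show splitNL (c :: t) = (c :: hd) :: r by simp [splitNL, e, hc]]
        have hqb : (c == '?') = false := beq_eq_false_iff_ne.mpr hq
        by_cases hm : '?' ∈ hd
        · have hc1 : PySem.Chars.isIn ['?'] (c :: hd) = true := by rw [isIn_q]; simp [hm]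
          have hc2 : PySem.Chars.isIn ['?'] hd = true := by rw [isIn_q]; simp [hm]
          rw [show stemLinesC ((c :: hd) :: r) = [c :: hd] by simp [stemLinesC, hc1]]
          rw [show stemLinesC (hd :: r) = [hd] by simp [stemLinesC, hc2]] at ih
          rw [PySem.Chars.join_singleton] at ih ⊢
          rw [show stemScan (c :: t) false = c :: stemScan t false by simp [stemScan, hqb], ← ih]
        · have hc1 : PySem.Chars.isIn ['?'] (c :: hd) = false := by
            rw [isIn_q]; simp [hm, Ne.symm hq]
          have hc2 : PySem.Chars.isIn ['?'] hd = false := by rw [isIn_q]; simp [hm]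
          rw [show stemLinesC ((c :: hd) :: r) = (c :: hd) :: stemLinesC r by
            simp [stemLinesC, hc1]]
          rw [show stemLinesC (hd :: r) = hd :: stemLinesC r by simp [stemLinesC, hc2]] at ih
          rw [join_cons_head, ih]
          rw [show stemScan (c :: t) false = c :: stemScan t false by simp [stemScan, hqb]]

theorem pyStemLines_map (L : List (List Char)) :
    pyStemLines (L.map String.ofList) = (stemLinesC L).map String.ofList := by
  induction L with
  | nil => rfl
  | cons l ls ih =>
    simp only [List.map_cons, pyStemLines, stemLinesC, PySem.Str.isIn_eq, String.toList_ofList]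
    rw [show ("?" : String).toList = ['?'] from rfl]
    split <;> simp_all

theorem stem_str (sc : String) :
    PySem.Str.join "\n" (pyStemLines ((PySem.Str.split? sc "\n").getD []))
      = String.ofList (stemScan sc.toList false) := by
  have hsplit : PySem.Str.split? sc "\n" = some ((splitNL sc.toList).map String.ofList) := by
    simp [PySem.Str.split?, PySem.Chars.split?, show ("\n" : String).toList = ['\n'] from rfl,
      splitOn_nl]
  rw [hsplit, Option.getD_some, pyStemLines_map, PySem.Str.join]
  rw [show ("\n" : String).toList = ['\n'] from rfl]
  simp only [List.map_map, Function.comp_def, String.toList_ofList, List.map_id']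
  rw [stem_chars]

theorem guard_eq (dc sc : String) :
    (!PySem.Str.isIn "?" dc && !(sc == "") && PySem.Str.isIn "?" sc)
      = (!PySem.Str.isIn "?" dc && PySem.Str.isIn "?" sc) := by
  by_cases h : sc = ""
  · subst h
    rw [show PySem.Str.isIn "?" "" = false from rfl]
    simp
  · rw [show (sc == "") = false from beq_eq_false_iff_ne.mpr h]
    simp

theorem loop_eq (sq : List (String × String)) (dq : List (String × String)) :
    ∀ acc : List (String × String),
    dq.foldl (fun missing_stems p =>
      let docx_content := p.2
      let scanned_content := (List.lookup p.1 sq).getD ""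
      if !PySem.Str.isIn "?" docx_content && !(scanned_content == "") && PySem.Str.isIn "?" scanned_content then
        missing_stems ++ [(p.1, PySem.Str.join "\n" (pyStemLines ((PySem.Str.split? scanned_content "\n").getD [])))]
      else missing_stems) acc
    = acc ++ dq.filterMap (fun p =>
        let sc := (List.lookup p.1 sq).getD ""
        if !PySem.Str.isIn "?" p.2 && PySem.Str.isIn "?" sc then
          some (p.1, String.ofList (stemScan sc.toList false))
        else none) := by
  induction dq with
  | nil => intro acc; simp
  | cons p t ih =>
    intro acc
    simp only [List.foldl_cons, List.filterMap_cons]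
    rw [guard_eq, stem_str]
    by_cases hg : (!PySem.Str.isIn "?" p.2 && PySem.Str.isIn "?" ((List.lookup p.1 sq).getD "")) = true
    · simp only [hg, if_true]
      rw [ih]
      simp
    · simp only [Bool.not_eq_true] at hg
      simp only [hg, Bool.false_eq_true, if_false]
      rw [ih]

-- ===== VERDICT (by name: the statement is the Claim_ definition above) =====
theorem analyze_missing_content_spec : Claim_equal_analyze_missing_content := by
  intro sq dq _
  unfold Spec_analyze_missing_content analyze_missing_content analyze_missing_content_alt
  simpa using loop_eq sq dq []
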